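-- pv_equiv track=rewrite | github.com/finefine2/codetree-TILs | 240201/독서실의 거리두기 3/study-cafe-keeping-distance-3.py | cal_dist
-- ===== SOURCE A (Python) =====
-- def cal_dist(string):
--     ans = 10000
--     for i in range(len(string)):
--         for j in range(len(string)):
--             if i == j:
--                 continue
--             if string[i] == '1' and string[j] == '1':
--                 ans = min(ans,abs(i-j))
--     return ans
-- ===== SOURCE B (Python) =====
-- def cal_dist(string):
--     ans = 10000
--     prev = None
--     for i, ch in enumerate(string):
--         if ch == '1':
--             if prev is not None:
--                 ans = min(ans, i - prev)
--             prev = i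
--     return ans
-- ===== Notes on version B (the rewrite author's own statement) =====
-- stated objective: faster
-- what changed: Replaced the quadratic all-pairs scan with a single left-to-right pass that tracks the previous '1' index and minimises the adjacent gap (the closest pair of '1's is always adjacent).
import Mathlib
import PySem

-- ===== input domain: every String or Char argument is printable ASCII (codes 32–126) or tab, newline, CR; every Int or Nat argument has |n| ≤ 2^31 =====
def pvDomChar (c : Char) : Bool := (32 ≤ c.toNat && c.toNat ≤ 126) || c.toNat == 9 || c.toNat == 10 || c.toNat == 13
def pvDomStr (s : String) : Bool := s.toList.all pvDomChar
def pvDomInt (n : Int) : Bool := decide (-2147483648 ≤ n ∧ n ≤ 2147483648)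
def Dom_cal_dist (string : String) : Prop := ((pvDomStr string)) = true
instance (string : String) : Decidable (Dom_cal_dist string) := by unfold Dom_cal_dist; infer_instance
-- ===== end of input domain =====

-- B replaces A's quadratic all-pairs scan by one linear pass that tracks the previous
-- '1' index and minimises the adjacent gap (objective: faster, asymptotic).

-- ===== PORT A =====
-- ans = 10000; for i in range(len(s)): for j in range(len(s)):
--   if i == j: continue
--   if s[i]=='1' and s[j]=='1': ans = min(ans, abs(i-j))
def cal_dist (string : String) : Int :=
  (PySem.List.pyRange 0 (PySem.Str.len string) 1).foldl (fun ans i =>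
    (PySem.List.pyRange 0 (PySem.Str.len string) 1).foldl (fun ans j =>
      if i = j then ans
      else if PySem.Str.pyGet? string i = some '1' ∧ PySem.Str.pyGet? string j = some '1'
        then min ans |i - j| else ans) ans) 10000

-- ===== PORT B =====
-- ans = 10000; prev = None; for i, ch in enumerate(string): if ch=='1': (min with i-prev; prev=i)
def cal_dist_alt (string : String) : Int :=
  ((PySem.List.enumerate string.toList 0).foldl
    (fun (st : Int × Option Int) p =>
      if p.2 = '1' then
        (match st.2 with
         | some pv => min st.1 (p.1 - pv)
         | none => st.1, some p.1)
      else st) (10000, none)).1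

-- ===== PRECONDITION & SPEC =====
def Spec_cal_dist (string : String) (out : Int) : Prop := out = cal_dist_alt string
instance (string : String) (out : Int) : Decidable (Spec_cal_dist string out) := by unfold Spec_cal_dist; infer_instance

-- ===== CLAIM (what is proved, stated in full; the proofs are below) =====
def Claim_equal_cal_dist : Prop := ∀ (string : String), Dom_cal_dist string → Spec_cal_dist string (cal_dist string)

-- ===== LEMMAS AND PROOFS =====

-- indices (as Ints, starting at k) of the '1' characters of a char list
def posFrom (k : Int) : List Char → List Int
  | [] => []
  | c :: t => if c = '1' then k :: posFrom (k + 1) t else posFrom (k + 1) t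

-- consecutive differences
def gaps : List Int → List Int
  | a :: b :: t => (b - a) :: gaps (b :: t)
  | _ => []

-- fold of conditional min
def minIf {α : Type} (p : α → Prop) [DecidablePred p] (f : α → Int) (c : Int) (L : List α) : Int :=
  L.foldl (fun a x => if p x then min a (f x) else a) c

theorem minIf_le_init {α : Type} (p : α → Prop) [DecidablePred p] (f : α → Int) (c : Int) (L : List α) :
    minIf p f c L ≤ c := by
  induction L generalizing c with
  | nil => simp [minIf]
  | cons x t ih =>
      simp only [minIf, List.foldl_cons]
      refine le_trans (ih _) ?_
      split_ifs <;> simp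

theorem minIf_le_mem {α : Type} (p : α → Prop) [DecidablePred p] (f : α → Int) {L : List α} :
    ∀ (c : Int) {x : α}, x ∈ L → p x → minIf p f c L ≤ f x := by
  induction L with
  | nil => intro c x hx _; cases hx
  | cons y t ih =>
      intro c x hx hp
      simp only [minIf, List.foldl_cons]
      rcases List.mem_cons.mp hx with h | h
      · subst h
        refine le_trans (minIf_le_init _ _ _ _) ?_
        simp [hp]
      · exact ih _ h hp

theorem le_minIf {α : Type} (p : α → Prop) [DecidablePred p] (f : α → Int) {c d : Int} {L : List α}
    (h0 : d ≤ c) (h : ∀ x ∈ L, p x → d ≤ f x) : d ≤ minIf p f c L := by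
  induction L generalizing c with
  | nil => simpa [minIf] using h0
  | cons y t ih =>
      simp only [minIf, List.foldl_cons]
      refine ih ?_ (fun x hx hp => h x (List.mem_cons_of_mem _ hx) hp)
      split_ifs with hy
      · exact le_min h0 (h y (List.mem_cons_self) hy)
      · exact h0

-- flatten a doubly-nested fold into a fold over the pair list
theorem foldl_foldl_flatMap {α₁ α₂ : Type} (g : Int → α₁ → α₂ → Int) (c : Int)
    (L : List α₁) (M : List α₂) :
    L.foldl (fun a i => M.foldl (fun a j => g a i j) a) c
      = (L.flatMap (fun i => M.map (fun j => (i, j)))).foldl (fun a p => g a p.1 p.2) c := by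
  induction L generalizing c with
  | nil => simp
  | cons i t ih => simp [List.foldl_append, List.foldl_map, ih]

-- A as a conditional-min fold over the list of index pairs
theorem cal_dist_eq_minIf (s : String) :
    cal_dist s = minIf
      (fun pr : Int × Int => pr.1 ≠ pr.2 ∧ PySem.List.pyGet? s.toList pr.1 = some '1'
          ∧ PySem.List.pyGet? s.toList pr.2 = some '1')
      (fun pr => |pr.1 - pr.2|) 10000
      ((PySem.List.pyRange 0 (PySem.Str.len s) 1).flatMap
        (fun i => (PySem.List.pyRange 0 (PySem.Str.len s) 1).map (fun j => (i, j)))) := by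
  unfold cal_dist minIf
  rw [foldl_foldl_flatMap
    (fun a i j => if i = j then a
      else if PySem.Str.pyGet? s i = some '1' ∧ PySem.Str.pyGet? s j = some '1'
        then min a |i - j| else a) 10000]
  congr 1
  funext a pr
  by_cases h1 : pr.1 = pr.2
  · simp [h1]
  · by_cases h2 : PySem.List.pyGet? s.toList pr.1 = some '1' ∧ PySem.List.pyGet? s.toList pr.2 = some '1'
    · simp [h1, h2, PySem.Str.pyGet?]
    · simp only [PySem.Str.pyGet?] at *
      simp [h1, h2]

def optCons {α : Type} : Option α → List α → List α
  | none, L => L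
  | some a, L => a :: L

-- loop invariant for B
theorem B_loop (l : List Char) : ∀ (k ans : Int) (prev : Option Int),
    ((PySem.List.enumerate l k).foldl
      (fun (st : Int × Option Int) p =>
        if p.2 = '1' then
          (match st.2 with
           | some pv => min st.1 (p.1 - pv)
           | none => st.1, some p.1)
        else st) (ans, prev)).1
    = minIf (fun _ => True) id ans (gaps (optCons prev (posFrom k l))) := by
  induction l with
  | nil =>
      intro k ans prev
      cases prev <;> simp [PySem.List.enumerate, posFrom, optCons, gaps, minIf]
  | cons c t ih =>
      intro k ans prev
      rw [PySem.List.enumerate_cons]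
      simp only [List.foldl_cons]
      by_cases hc : c = '1'
      · cases prev with
        | none =>
            simp only [hc, if_true]
            rw [ih (k + 1) ans (some k)]
            simp [posFrom, optCons]
        | some pv =>
            simp only [hc, if_true]
            rw [ih (k + 1) (min ans (k - pv)) (some k)]
            simp only [posFrom, optCons, if_true]
            cases ht : posFrom (k + 1) t with
            | nil => simp [gaps, minIf]
            | cons y ys => simp [gaps, minIf]
      · simp only [hc, if_false]
        rw [ih (k + 1) ans prev]
        simp [posFrom, hc]

theorem cal_dist_alt_eq_minIf (s : String) :
    cal_dist_alt s = minIf (fun _ => True) id 10000 (gaps (posFrom 0 s.toList)) := by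
  unfold cal_dist_alt
  simpa [optCons] using B_loop s.toList 0 10000 none

-- membership characterisation of posFrom
theorem mem_posFrom {l : List Char} : ∀ (k i : Int),
    i ∈ posFrom k l ↔ ∃ m : Nat, m < l.length ∧ i = k + m ∧ l[m]? = some '1' := by
  induction l with
  | nil => intro k i; simp [posFrom]
  | cons c t ih =>
      intro k i
      constructor
      · intro h
        by_cases hc : c = '1'
        · simp only [posFrom, if_pos hc] at h
          rcases List.mem_cons.mp h with h | h
          · exact ⟨0, by simp, by simpa using h, by simpa using hc⟩
          · rcases (ih (k + 1) i).mp h with ⟨m, hm, hi, hg⟩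
            exact ⟨m + 1, by simp [List.length_cons]; omega, by push_cast at hi ⊢; omega,
              by simpa using hg⟩
        · simp only [posFrom, if_neg hc] at h
          rcases (ih (k + 1) i).mp h with ⟨m, hm, hi, hg⟩
          exact ⟨m + 1, by simp [List.length_cons]; omega, by push_cast at hi ⊢; omega,
            by simpa using hg⟩
      · rintro ⟨m, hm, hi, hg⟩
        cases m with
        | zero =>
            simp only [List.getElem?_cons_zero, Option.some.injEq] at hg
            simp [posFrom, hg, hi]
        | succ m =>
            simp only [List.getElem?_cons_succ] at hg
            simp only [List.length_cons] at hm
            have : i ∈ posFrom (k + 1) t :=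
              (ih (k + 1) i).mpr ⟨m, by omega, by push_cast at hi ⊢; omega, hg⟩
            by_cases hc : c = '1' <;> simp [posFrom, hc, this]

theorem posFrom_ge {l : List Char} : ∀ (k i : Int), i ∈ posFrom k l → k ≤ i := by
  induction l with
  | nil => intro k i h; simp [posFrom] at h
  | cons c t ih =>
      intro k i h
      by_cases hc : c = '1'
      · simp only [posFrom, if_pos hc] at h
        rcases List.mem_cons.mp h with h | h
        · omega
        · have := ih (k + 1) i h; omega
      · simp only [posFrom, if_neg hc] at h
        have := ih (k + 1) i h; omega

theorem posFrom_pairwise (l : List Char) : ∀ k : Int, (posFrom k l).Pairwise (· < ·) := by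
  induction l with
  | nil => intro k; simp [posFrom]
  | cons c t ih =>
      intro k
      by_cases hc : c = '1'
      · simp only [posFrom, if_pos hc]
        refine List.pairwise_cons.mpr ⟨fun x hx => ?_, ih (k + 1)⟩
        have := posFrom_ge (k + 1) x hx; omega
      · simp only [posFrom, if_neg hc]; exact ih (k + 1)

-- every gap comes from a strictly increasing pair of the list
theorem gaps_subpairs : ∀ {P : List Int}, P.Pairwise (· < ·) →
    ∀ g ∈ gaps P, ∃ a ∈ P, ∃ b ∈ P, a < b ∧ g = b - a := by
  intro P
  induction P with
  | nil => intro _ g hg; simp [gaps] at hg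
  | cons a t ih =>
      intro hp g hg
      cases t with
      | nil => simp [gaps] at hg
      | cons b t' =>
          rcases List.pairwise_cons.mp hp with ⟨hab, ht⟩
          simp only [gaps] at hg
          rcases List.mem_cons.mp hg with h | h
          · exact ⟨a, List.mem_cons_self, b, List.mem_cons_of_mem _ List.mem_cons_self,
              hab b List.mem_cons_self, h⟩
          · rcases ih ht g h with ⟨x, hx, y, hy, hxy, hgy⟩
            exact ⟨x, List.mem_cons_of_mem _ hx, y, List.mem_cons_of_mem _ hy, hxy, hgy⟩

-- any strictly increasing pair dominates some adjacent gap
theorem gaps_dominates : ∀ {P : List Int}, P.Pairwise (· < ·) →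
    ∀ {a b : Int}, a ∈ P → b ∈ P → a < b → ∃ g ∈ gaps P, g ≤ b - a := by
  intro P
  induction P with
  | nil => intro _ a b ha; cases ha
  | cons x t ih =>
      intro hp a b ha hb hab
      rcases List.pairwise_cons.mp hp with ⟨hx, ht⟩
      by_cases hax : a = x
      · subst hax
        have hbt : b ∈ t := by
          rcases List.mem_cons.mp hb with h | h
          · omega
          · exact h
        cases t with
        | nil => cases hbt
        | cons y t' =>
            refine ⟨y - a, by simp [gaps], ?_⟩
            rcases List.mem_cons.mp hbt with h | h
            · omega
            · have := (List.pairwise_cons.mp ht).1 b h; omega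
      · have hat : a ∈ t := by
          rcases List.mem_cons.mp ha with h | h
          · exact absurd h hax
          · exact h
        have hbt : b ∈ t := by
          rcases List.mem_cons.mp hb with h | h
          · subst h; have := hx a hat; omega
          · exact h
        rcases ih ht hat hbt hab with ⟨g, hg, hgle⟩
        cases t with
        | nil => cases hat
        | cons y t' => exact ⟨g, by simp [gaps]; right; simpa [gaps] using hg, hgle⟩

-- link posFrom 0 to pyGet? and range membership
theorem mem_pos_iff (l : List Char) (i : Int) :
    i ∈ posFrom 0 l ↔ 0 ≤ i ∧ i < (l.length : Int) ∧ PySem.List.pyGet? l i = some '1' := by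
  rw [mem_posFrom 0 i]
  constructor
  · rintro ⟨m, hm, hi, hg⟩
    have h0 : (0:Int) ≤ i := by omega
    refine ⟨h0, by omega, ?_⟩
    rw [PySem.List.pyGet?_of_nonneg _ h0]
    have : i.toNat = m := by omega
    rw [this]; exact hg
  · rintro ⟨h0, hlen, hg⟩
    refine ⟨i.toNat, by omega, by omega, ?_⟩
    rw [PySem.List.pyGet?_of_nonneg _ h0] at hg
    exact hg

-- ===== VERDICT (by name: the statement is the Claim_ definition above) =====
theorem cal_dist_spec : Claim_equal_cal_dist := by
  intro s _
  unfold Spec_cal_dist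
  rw [cal_dist_eq_minIf, cal_dist_alt_eq_minIf]
  set l := s.toList with hl
  have hlen : PySem.Str.len s = (l.length : Int) := by simp [PySem.Str.len, hl]
  rw [hlen]
  have hpw := posFrom_pairwise l 0
  apply le_antisymm
  · -- A ≤ B
    refine le_minIf _ _ (minIf_le_init _ _ _ _) ?_
    intro g hg _
    rcases gaps_subpairs hpw g hg with ⟨a, ha, b, hb, hab, hgab⟩
    rcases (mem_pos_iff l a).mp ha with ⟨ha0, haln, hag⟩
    rcases (mem_pos_iff l b).mp hb with ⟨hb0, hbln, hbg⟩
    have hmem : (a, b) ∈ (PySem.List.pyRange 0 (l.length : Int) 1).flatMap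
        (fun i => (PySem.List.pyRange 0 (l.length : Int) 1).map (fun j => (i, j))) := by
      refine List.mem_flatMap.mpr ⟨a, PySem.List.mem_pyRange_one.mpr ⟨ha0, haln⟩, ?_⟩
      exact List.mem_map.mpr ⟨b, PySem.List.mem_pyRange_one.mpr ⟨hb0, hbln⟩, rfl⟩
    have := minIf_le_mem
      (fun pr : Int × Int => pr.1 ≠ pr.2 ∧ PySem.List.pyGet? l pr.1 = some '1'
          ∧ PySem.List.pyGet? l pr.2 = some '1')
      (fun pr => |pr.1 - pr.2|) 10000 hmem ⟨by intro h; omega, hag, hbg⟩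
    simpa [hgab, abs_of_nonpos (by omega : a - b ≤ 0)] using this
  · -- B ≤ A
    refine le_minIf _ _ (minIf_le_init _ _ _ _) ?_
    intro pr hmem hp
    rcases List.mem_flatMap.mp hmem with ⟨i, hi', hpr⟩
    rcases List.mem_map.mp hpr with ⟨j, hj', rfl⟩
    obtain ⟨hne, hi1, hj1⟩ := hp
    simp only at hne hi1 hj1
    rcases PySem.List.mem_pyRange_one.mp hi' with ⟨hi0, hiln⟩
    rcases PySem.List.mem_pyRange_one.mp hj' with ⟨hj0, hjln⟩
    have hip : i ∈ posFrom 0 l := (mem_pos_iff l i).mpr ⟨hi0, hiln, hi1⟩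
    have hjp : j ∈ posFrom 0 l := (mem_pos_iff l j).mpr ⟨hj0, hjln, hj1⟩
    rcases lt_or_gt_of_ne hne with hlt | hgt
    · rcases gaps_dominates hpw hip hjp hlt with ⟨g, hg, hgle⟩
      have := minIf_le_mem (fun _ => True) id 10000 hg trivial
      simp only [id] at this
      calc minIf (fun _ => True) id 10000 (gaps (posFrom 0 l)) ≤ g := this
        _ ≤ |(i, j).1 - (i, j).2| := by
            simp only; rw [abs_of_nonpos (by omega : i - j ≤ 0)]; omega
    · rcases gaps_dominates hpw hjp hip hgt with ⟨g, hg, hgle⟩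
      have := minIf_le_mem (fun _ => True) id 10000 hg trivial
      simp only [id] at this
      calc minIf (fun _ => True) id 10000 (gaps (posFrom 0 l)) ≤ g := this
        _ ≤ |(i, j).1 - (i, j).2| := by
            simp only; rw [abs_of_nonneg (by omega : 0 ≤ i - j)]; omega
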